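-- pv_equiv track=rewrite | github.com/wetnoodle235/WNBP_v2 | v5.0/scripts/weak_sports_feature_analysis.py | _feature_family
-- ===== SOURCE A (Python) =====
-- def _feature_family(column: str) -> str:
--     c = column.lower()
--     if any(tok in c for tok in ("odds", "moneyline", "spread", "total", "implied")):
--         return "odds_market"
--     if any(tok in c for tok in ("injury", "lineup", "depth", "availability")):
--         return "roster_availability"
--     if any(tok in c for tok in ("xg", "xga", "expected_goal", "shot_quality")):
--         return "advanced_attack"
--     if any(tok in c for tok in ("form", "momentum", "streak", "rolling", "recent", "overperformance")):
--         return "player_team_form"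
--     if any(tok in c for tok in ("h2h", "surface", "rest", "fatigue", "travel", "opponent")):
--         return "matchup_context"
--     if any(tok in c for tok in ("q1", "q2", "q3", "q4", "period", "half", "inning", "set", "map")):
--         return "event_split"
--     if any(tok in c for tok in ("elo", "rate", "pct", "eff", "per_")):
--         return "efficiency_rate"
--     return "general"
-- ===== SOURCE B (Python) =====
-- # Multi-pattern scan: walk the suffixes of the lowered column once and, at each
-- # position, record the smallest family priority whose token starts there.
-- _TOKENS = [
--     ("odds", 0), ("moneyline", 0), ("spread", 0), ("total", 0), ("implied", 0),
--     ("injury", 1), ("lineup", 1), ("depth", 1), ("availability", 1),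
--     ("xg", 2), ("xga", 2), ("expected_goal", 2), ("shot_quality", 2),
--     ("form", 3), ("momentum", 3), ("streak", 3), ("rolling", 3), ("recent", 3), ("overperformance", 3),
--     ("h2h", 4), ("surface", 4), ("rest", 4), ("fatigue", 4), ("travel", 4), ("opponent", 4),
--     ("q1", 5), ("q2", 5), ("q3", 5), ("q4", 5), ("period", 5), ("half", 5), ("inning", 5), ("set", 5), ("map", 5),
--     ("elo", 6), ("rate", 6), ("pct", 6), ("eff", 6), ("per_", 6),
-- ]
-- _BYCHAR = {}
-- for _tok, _p in _TOKENS: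
--     _BYCHAR.setdefault(_tok[0], []).append((_tok, _p))
--
-- _NAMES = ["odds_market", "roster_availability", "advanced_attack", "player_team_form",
--           "matchup_context", "event_split", "efficiency_rate", "general"]
--
-- def _feature_family(column: str) -> str:
--     c = column.lower()
--     best = 7
--     for i in range(len(c)):
--         for tok, p in _BYCHAR.get(c[i], ()):
--             if p < best and c.startswith(tok, i):
--                 best = p
--     return _NAMES[best]
-- ===== Notes on version B (the rewrite author's own statement) =====
-- stated objective: alternative
-- what changed: Instead of seven sequential per-family substring searches, B scans the positions of the lowered column once, matching by prefix only the tokens bucketed under the character at each position, and keeps the minimum family priority.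
import Mathlib
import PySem

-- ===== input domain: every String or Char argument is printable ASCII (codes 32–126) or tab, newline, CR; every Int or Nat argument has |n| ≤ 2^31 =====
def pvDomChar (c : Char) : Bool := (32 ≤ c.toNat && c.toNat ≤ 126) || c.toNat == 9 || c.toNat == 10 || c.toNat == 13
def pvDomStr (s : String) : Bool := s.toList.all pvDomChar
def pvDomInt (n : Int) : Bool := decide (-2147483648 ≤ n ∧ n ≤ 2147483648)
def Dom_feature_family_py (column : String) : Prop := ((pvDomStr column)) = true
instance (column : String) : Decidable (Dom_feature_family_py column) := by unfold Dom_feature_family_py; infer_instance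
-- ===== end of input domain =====

-- B replaces A's seven sequential per-family substring searches by one scan over the
-- suffixes of the lowered column that matches every token by prefix and keeps the
-- minimum family priority (alternative algorithm, same cost).

-- ===== PORT A =====
def feature_family_py (column : String) : String :=
  let c := PySem.Str.lower column
  if (["odds", "moneyline", "spread", "total", "implied"] : List String).any (fun tok => PySem.Str.isIn tok c) then
    "odds_market"
  else if (["injury", "lineup", "depth", "availability"] : List String).any (fun tok => PySem.Str.isIn tok c) then
    "roster_availability"
  else if (["xg", "xga", "expected_goal", "shot_quality"] : List String).any (fun tok => PySem.Str.isIn tok c) then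
    "advanced_attack"
  else if (["form", "momentum", "streak", "rolling", "recent", "overperformance"] : List String).any (fun tok => PySem.Str.isIn tok c) then
    "player_team_form"
  else if (["h2h", "surface", "rest", "fatigue", "travel", "opponent"] : List String).any (fun tok => PySem.Str.isIn tok c) then
    "matchup_context"
  else if (["q1", "q2", "q3", "q4", "period", "half", "inning", "set", "map"] : List String).any (fun tok => PySem.Str.isIn tok c) then
    "event_split"
  else if (["elo", "rate", "pct", "eff", "per_"] : List String).any (fun tok => PySem.Str.isIn tok c) then
    "efficiency_rate"
  else
    "general"

-- ===== PORT B =====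
-- Source B's _TOKENS table (tokens carried as their character lists)
def pvTokens : List (List Char × Nat) :=
  [ ("odds".toList, 0), ("moneyline".toList, 0), ("spread".toList, 0), ("total".toList, 0), ("implied".toList, 0),
    ("injury".toList, 1), ("lineup".toList, 1), ("depth".toList, 1), ("availability".toList, 1),
    ("xg".toList, 2), ("xga".toList, 2), ("expected_goal".toList, 2), ("shot_quality".toList, 2),
    ("form".toList, 3), ("momentum".toList, 3), ("streak".toList, 3), ("rolling".toList, 3), ("recent".toList, 3), ("overperformance".toList, 3),
    ("h2h".toList, 4), ("surface".toList, 4), ("rest".toList, 4), ("fatigue".toList, 4), ("travel".toList, 4), ("opponent".toList, 4),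
    ("q1".toList, 5), ("q2".toList, 5), ("q3".toList, 5), ("q4".toList, 5), ("period".toList, 5), ("half".toList, 5), ("inning".toList, 5), ("set".toList, 5), ("map".toList, 5),
    ("elo".toList, 6), ("rate".toList, 6), ("pct".toList, 6), ("eff".toList, 6), ("per_".toList, 6) ]

-- Source B's _NAMES table
def pvNames : List String :=
  ["odds_market", "roster_availability", "advanced_attack", "player_team_form",
   "matchup_context", "event_split", "efficiency_rate", "general"]

-- Source B's _BYCHAR dict: tokens bucketed by first character (setdefault-append fold)
def pvByChar : PySem.Dict Char (List (List Char × Nat)) :=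
  pvTokens.foldl
    (fun d tp => PySem.Dict.insert d (tp.1.headD ' ') (PySem.Dict.getD d (tp.1.headD ' ') [] ++ [tp]))
    PySem.Dict.empty

-- Source B's position loop (position i traversed as the suffix c[i:] = a :: s), updating
-- best with the inner for-loop over the bucket of the character at i
def pvScan : List Char → Nat → Nat
  | [], best => best
  | a :: s, best =>
      pvScan s ((PySem.Dict.getD pvByChar a []).foldl
        (fun b tp => if tp.2 < b && PySem.Chars.startswith (a :: s) tp.1 then tp.2 else b) best)

def feature_family_py_alt (column : String) : String :=
  PySem.List.pyGetD pvNames ((pvScan (PySem.Str.lower column).toList 7 : Nat) : Int) ""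

-- ===== PRECONDITION & SPEC =====
def Spec_feature_family_py (column : String) (out : String) : Prop := out = feature_family_py_alt column
instance (column : String) (out : String) : Decidable (Spec_feature_family_py column out) := by unfold Spec_feature_family_py; infer_instance

-- ===== CLAIM (what is proved, stated in full; the proofs are below) =====
def Claim_equal_feature_family_py : Prop := ∀ (column : String), Dom_feature_family_py column → Spec_feature_family_py column (feature_family_py column)

-- ===== LEMMAS AND PROOFS =====

-- generic min-accumulating fold over a token table
def pvF (cond : List Char × Nat → Bool) (b : Nat) (ts : List (List Char × Nat)) : Nat :=
  ts.foldl (fun m tp => if cond tp then min m tp.2 else m) b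

theorem pvF_cons (cond : List Char × Nat → Bool) (b : Nat) (tp : List Char × Nat)
    (ts : List (List Char × Nat)) :
    pvF cond b (tp :: ts) = pvF cond (if cond tp then min b tp.2 else b) ts := by
  simp only [pvF, List.foldl_cons]

theorem pvF_le (cond : List Char × Nat → Bool) (ts : List (List Char × Nat)) :
    ∀ b, pvF cond b ts ≤ b := by
  induction ts with
  | nil => intro b; simp [pvF]
  | cons tp ts ih =>
      intro b
      rw [pvF_cons]
      refine le_trans (ih _) ?_
      split
      · exact Nat.min_le_left _ _
      · exact le_rfl

theorem pvF_min (cond : List Char × Nat → Bool) (ts : List (List Char × Nat)) :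
    ∀ b c, pvF cond (min b c) ts = min b (pvF cond c ts) := by
  induction ts with
  | nil => intro b c; simp [pvF]
  | cons tp ts ih =>
      intro b c
      rw [pvF_cons, pvF_cons]
      split
      · rw [Nat.min_assoc, ih]
      · exact ih b c

theorem pvF_extract (cond : List Char × Nat → Bool) (ts : List (List Char × Nat))
    (b : Nat) (hb : b ≤ 7) : pvF cond b ts = min b (pvF cond 7 ts) := by
  have h : min b 7 = b := by omega
  conv_lhs => rw [← h]
  rw [pvF_min]

-- the guarded update of Source B's inner loop is the min-accumulating fold
theorem pvStep_eq (cond : List Char × Nat → Bool) (ts : List (List Char × Nat)) :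
    ∀ b, ts.foldl (fun b tp => if tp.2 < b && cond tp then tp.2 else b) b = pvF cond b ts := by
  induction ts with
  | nil => intro b; simp [pvF]
  | cons tp ts ih =>
      intro b
      rw [pvF_cons, List.foldl_cons]
      have : (if tp.2 < b && cond tp then tp.2 else b) = if cond tp then min b tp.2 else b := by
        cases h : cond tp
        · simp
        · simp only [Bool.and_true, decide_eq_true_eq, if_true]
          rw [Nat.min_def]
          split_ifs <;> omega
      rw [this]
      exact ih _

-- splitting an OR condition
theorem pvF_or (c1 c2 : List Char × Nat → Bool) (ts : List (List Char × Nat)) :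
    pvF (fun tp => c1 tp || c2 tp) 7 ts = min (pvF c1 7 ts) (pvF c2 7 ts) := by
  induction ts with
  | nil => simp [pvF]
  | cons tp ts ih =>
      rw [pvF_cons, pvF_cons, pvF_cons,
          pvF_extract _ ts _ (by split <;> omega),
          pvF_extract c1 ts _ (by split <;> omega),
          pvF_extract c2 ts _ (by split <;> omega), ih]
      cases h1 : c1 tp <;> cases h2 : c2 tp <;> simp <;> omega

-- pointwise-equal conditions give equal folds
theorem pvF_congr (c1 c2 : List Char × Nat → Bool) (h : ∀ tp, c1 tp = c2 tp)
    (ts : List (List Char × Nat)) (b : Nat) : pvF c1 b ts = pvF c2 b ts := by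
  have hc : c1 = c2 := funext h
  rw [hc]

-- a constant-priority block folds to an if-any test
theorem pvF_const (cond : List Char × Nat → Bool) (k : Nat) :
    ∀ (ts : List (List Char × Nat)), (∀ tp ∈ ts, tp.2 = k) →
    ∀ b, pvF cond b ts = if ts.any cond then min b k else b := by
  intro ts
  induction ts with
  | nil => intro _ b; simp [pvF]
  | cons tp ts ih =>
      intro hk b
      have hp : tp.2 = k := hk tp (by simp)
      have hrest : ∀ tp ∈ ts, tp.2 = k := fun tp h => hk tp (by simp [h])
      rw [pvF_cons, List.any_cons, ih hrest]
      cases h : cond tp <;> cases ha : ts.any cond <;> simp [hp] <;> omega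

-- building the dict by setdefault-append groups: a bucket is a filter of the table
theorem pvGroup (kf : List Char × Nat → Char) :
    ∀ (ts : List (List Char × Nat)) (d : PySem.Dict Char (List (List Char × Nat))) (a : Char),
    PySem.Dict.getD
      (ts.foldl (fun d tp => PySem.Dict.insert d (kf tp) (PySem.Dict.getD d (kf tp) [] ++ [tp])) d) a []
      = PySem.Dict.getD d a [] ++ ts.filter (fun tp => kf tp == a) := by
  intro ts
  induction ts with
  | nil => intro d a; simp
  | cons tp ts ih =>
      intro d a
      rw [List.foldl_cons, ih, List.filter_cons]
      rw [PySem.Dict.getD_insert]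
      by_cases h : a = kf tp
      · simp [h]
      · have hb : (kf tp == a) = false := by simp [Ne.symm h]
        simp [h, hb]

theorem pvBucket_eq (a : Char) :
    PySem.Dict.getD pvByChar a [] = pvTokens.filter (fun tp => tp.1.headD ' ' == a) := by
  rw [pvByChar, pvGroup]
  simp

-- elements dropped by the filter never satisfy cond, so the fold is unchanged
theorem pvF_filter (cond pred : List Char × Nat → Bool) :
    ∀ (ts : List (List Char × Nat)), (∀ tp ∈ ts, cond tp = true → pred tp = true) →
    ∀ b, pvF cond b (ts.filter pred) = pvF cond b ts := by
  intro ts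
  induction ts with
  | nil => intro _ b; simp
  | cons tp ts ih =>
      intro h b
      have hrest : ∀ tp ∈ ts, cond tp = true → pred tp = true := fun tp htp => h tp (by simp [htp])
      rw [List.filter_cons, pvF_cons]
      cases hp : pred tp
      · have hc : cond tp = false := by
          cases hc : cond tp
          · rfl
          · rw [h tp (by simp) hc] at hp; cases hp
        simp [hc, ih hrest]
      · simp [pvF_cons, ih hrest]

-- a token matching by prefix at a :: s starts with a
theorem pvHead_of_startswith (a : Char) (s : List Char) :
    ∀ tp ∈ pvTokens, PySem.Chars.startswith (a :: s) tp.1 = true → (tp.1.headD ' ' == a) = true := by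
  have hne : ∀ tp ∈ pvTokens, tp.1 ≠ [] := by decide
  intro tp htp hsw
  rw [PySem.Chars.startswith_iff] at hsw
  obtain ⟨x, l, hx⟩ : ∃ x l, tp.1 = x :: l := by
    cases hcase : tp.1 with
    | nil => exact absurd hcase (hne tp htp)
    | cons x l => exact ⟨x, l, rfl⟩
  rw [hx] at hsw ⊢
  obtain ⟨rfl, -⟩ := List.cons_prefix_cons.mp hsw
  simp

-- the scan computes min over suffix-prefix (= infix) matches
theorem pvScan_eq (s : List Char) :
    ∀ b, b ≤ 7 → pvScan s b = min b (pvF (fun tp => decide (tp.1 <:+: s)) 7 pvTokens) := by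
  induction s with
  | nil =>
      intro b hb
      have h7 : pvF (fun tp => decide (tp.1 <:+: ([] : List Char))) 7 pvTokens = 7 := by decide
      simp only [pvScan, h7]; omega
  | cons a s ih =>
      intro b hb
      have hcond : ∀ tp : List Char × Nat,
          (decide (tp.1 <:+: (a :: s)) : Bool) =
          (PySem.Chars.startswith (a :: s) tp.1 || decide (tp.1 <:+: s)) := by
        intro tp
        rw [Bool.eq_iff_iff]
        simp [PySem.Chars.startswith_iff, List.infix_cons_iff]
      have hb' : pvF (fun tp => PySem.Chars.startswith (a :: s) tp.1) b pvTokens ≤ 7 :=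
        le_trans (pvF_le _ _ b) hb
      calc pvScan (a :: s) b
          = pvScan s (pvF (fun tp => PySem.Chars.startswith (a :: s) tp.1) b pvTokens) := by
            simp only [pvScan, pvStep_eq, pvBucket_eq]
            rw [pvF_filter _ _ pvTokens (pvHead_of_startswith a s) b]
        _ = min (pvF (fun tp => PySem.Chars.startswith (a :: s) tp.1) b pvTokens)
              (pvF (fun tp => decide (tp.1 <:+: s)) 7 pvTokens) := ih _ hb'
        _ = min b (pvF (fun tp => decide (tp.1 <:+: (a :: s))) 7 pvTokens) := by
            rw [pvF_congr _ _ hcond, pvF_or,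
                pvF_extract (fun tp => PySem.Chars.startswith (a :: s) tp.1) pvTokens b hb]
            omega

-- the per-family token blocks of the flat table
def pvT0 : List (List Char × Nat) := [("odds".toList, 0), ("moneyline".toList, 0), ("spread".toList, 0), ("total".toList, 0), ("implied".toList, 0)]
def pvT1 : List (List Char × Nat) := [("injury".toList, 1), ("lineup".toList, 1), ("depth".toList, 1), ("availability".toList, 1)]
def pvT2 : List (List Char × Nat) := [("xg".toList, 2), ("xga".toList, 2), ("expected_goal".toList, 2), ("shot_quality".toList, 2)]
def pvT3 : List (List Char × Nat) := [("form".toList, 3), ("momentum".toList, 3), ("streak".toList, 3), ("rolling".toList, 3), ("recent".toList, 3), ("overperformance".toList, 3)]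
def pvT4 : List (List Char × Nat) := [("h2h".toList, 4), ("surface".toList, 4), ("rest".toList, 4), ("fatigue".toList, 4), ("travel".toList, 4), ("opponent".toList, 4)]
def pvT5 : List (List Char × Nat) := [("q1".toList, 5), ("q2".toList, 5), ("q3".toList, 5), ("q4".toList, 5), ("period".toList, 5), ("half".toList, 5), ("inning".toList, 5), ("set".toList, 5), ("map".toList, 5)]
def pvT6 : List (List Char × Nat) := [("elo".toList, 6), ("rate".toList, 6), ("pct".toList, 6), ("eff".toList, 6), ("per_".toList, 6)]

theorem pvTokens_split : pvTokens = pvT0 ++ pvT1 ++ pvT2 ++ pvT3 ++ pvT4 ++ pvT5 ++ pvT6 := by rfl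

-- A's branch chain and B's min chain as functions of the 7 family-match booleans
def pvAChain (q0 q1 q2 q3 q4 q5 q6 : Bool) : String :=
  if q0 then "odds_market"
  else if q1 then "roster_availability"
  else if q2 then "advanced_attack"
  else if q3 then "player_team_form"
  else if q4 then "matchup_context"
  else if q5 then "event_split"
  else if q6 then "efficiency_rate"
  else "general"

def pvBVal (q0 q1 q2 q3 q4 q5 q6 : Bool) : Nat :=
  let v0 := if q0 then min 7 0 else 7
  let v1 := if q1 then min v0 1 else v0
  let v2 := if q2 then min v1 2 else v1
  let v3 := if q3 then min v2 3 else v2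
  let v4 := if q4 then min v3 4 else v3
  let v5 := if q5 then min v4 5 else v4
  if q6 then min v5 6 else v5

theorem pvMix : ∀ q0 q1 q2 q3 q4 q5 q6 : Bool,
    pvAChain q0 q1 q2 q3 q4 q5 q6 =
      PySem.List.pyGetD pvNames ((pvBVal q0 q1 q2 q3 q4 q5 q6 : Nat) : Int) "" := by
  decide

-- each Python 'tok in c' equals the Bool infix test on the character lists
theorem pvIsIn_eq (sub s : String) :
    PySem.Str.isIn sub s = decide (sub.toList <:+: s.toList) := by
  rw [Bool.eq_iff_iff, PySem.Str.isIn_iff_infix, decide_eq_true_eq]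

theorem pvFI_eq (cl : List Char) :
    pvF (fun tp => decide (tp.1 <:+: cl)) 7 pvTokens =
      pvBVal (pvT0.any (fun tp => decide (tp.1 <:+: cl))) (pvT1.any (fun tp => decide (tp.1 <:+: cl)))
             (pvT2.any (fun tp => decide (tp.1 <:+: cl))) (pvT3.any (fun tp => decide (tp.1 <:+: cl)))
             (pvT4.any (fun tp => decide (tp.1 <:+: cl))) (pvT5.any (fun tp => decide (tp.1 <:+: cl)))
             (pvT6.any (fun tp => decide (tp.1 <:+: cl))) := by
  have hsplit : ∀ b (l1 l2 : List (List Char × Nat)) (cond : List Char × Nat → Bool),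
      pvF cond b (l1 ++ l2) = pvF cond (pvF cond b l1) l2 := by
    intro b l1 l2 cond; simp [pvF, List.foldl_append]
  rw [pvTokens_split]
  rw [hsplit, hsplit, hsplit, hsplit, hsplit, hsplit]
  rw [pvF_const _ 0 pvT0 (by decide), pvF_const _ 1 pvT1 (by decide),
      pvF_const _ 2 pvT2 (by decide), pvF_const _ 3 pvT3 (by decide),
      pvF_const _ 4 pvT4 (by decide), pvF_const _ 5 pvT5 (by decide),
      pvF_const _ 6 pvT6 (by decide)]
  rfl

-- ===== VERDICT (by name: the statement is the Claim_ definition above) =====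
theorem feature_family_py_spec : Claim_equal_feature_family_py := by
  intro column _
  show feature_family_py column = feature_family_py_alt column
  have hscan : pvScan (PySem.Str.lower column).toList 7 =
      pvF (fun tp => decide (tp.1 <:+: (PySem.Str.lower column).toList)) 7 pvTokens := by
    rw [pvScan_eq _ 7 (by omega)]
    have := pvF_le (fun tp => decide (tp.1 <:+: (PySem.Str.lower column).toList)) pvTokens 7
    omega
  have hA : feature_family_py column =
      pvAChain (pvT0.any (fun tp => decide (tp.1 <:+: (PySem.Str.lower column).toList)))
               (pvT1.any (fun tp => decide (tp.1 <:+: (PySem.Str.lower column).toList)))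
               (pvT2.any (fun tp => decide (tp.1 <:+: (PySem.Str.lower column).toList)))
               (pvT3.any (fun tp => decide (tp.1 <:+: (PySem.Str.lower column).toList)))
               (pvT4.any (fun tp => decide (tp.1 <:+: (PySem.Str.lower column).toList)))
               (pvT5.any (fun tp => decide (tp.1 <:+: (PySem.Str.lower column).toList)))
               (pvT6.any (fun tp => decide (tp.1 <:+: (PySem.Str.lower column).toList))) := by
    simp only [feature_family_py, pvAChain, pvT0, pvT1, pvT2, pvT3, pvT4, pvT5, pvT6,
      List.any_cons, List.any_nil, Bool.or_false, pvIsIn_eq]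
  rw [hA, feature_family_py_alt, hscan, pvFI_eq, pvMix]
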